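-- pv_equiv track=rewrite | github.com/rsms/inter | misc/pylib/extractor/formats/opentype.py | _skimNameIDs
-- ===== SOURCE A (Python) =====
-- def _skimNameIDs(nameIDs, priority):
--     for (nameID, platformID, platEncID, langID) in priority:
--         for (nID, pID, pEID, lID), text in nameIDs.items():
--             if nID != nameID:
--                 continue
--             if pID != platformID and platformID is not None:
--                 continue
--             if pEID != platEncID and platEncID is not None:
--                 continue
--             if lID != langID and langID is not None:
--                 continue
--             return text
-- ===== SOURCE B (Python) =====
-- def _skimNameIDs(nameIDs, priority):
--     # Group the table once by nameID, preserving insertion order within each bucket,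
--     # then answer each priority query by scanning only its bucket.
--     index = {}
--     for (nID, pID, pEID, lID), text in nameIDs.items():
--         index.setdefault(nID, []).append(((pID, pEID, lID), text))
--     for (nameID, platformID, platEncID, langID) in priority:
--         for (pID, pEID, lID), text in index.get(nameID, []):
--             if (platformID is None or pID == platformID) and \
--                (platEncID is None or pEID == platEncID) and \
--                (langID is None or lID == langID):
--                 return text
--     return None
-- ===== Notes on version B (the rewrite author's own statement) =====
-- stated objective: faster
-- what changed: Instead of rescanning the whole nameIDs dict for every priority entry, B groups the dict once into per-nameID buckets (preserving insertion order) and answers each query by scanning only its bucket.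
import Mathlib
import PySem

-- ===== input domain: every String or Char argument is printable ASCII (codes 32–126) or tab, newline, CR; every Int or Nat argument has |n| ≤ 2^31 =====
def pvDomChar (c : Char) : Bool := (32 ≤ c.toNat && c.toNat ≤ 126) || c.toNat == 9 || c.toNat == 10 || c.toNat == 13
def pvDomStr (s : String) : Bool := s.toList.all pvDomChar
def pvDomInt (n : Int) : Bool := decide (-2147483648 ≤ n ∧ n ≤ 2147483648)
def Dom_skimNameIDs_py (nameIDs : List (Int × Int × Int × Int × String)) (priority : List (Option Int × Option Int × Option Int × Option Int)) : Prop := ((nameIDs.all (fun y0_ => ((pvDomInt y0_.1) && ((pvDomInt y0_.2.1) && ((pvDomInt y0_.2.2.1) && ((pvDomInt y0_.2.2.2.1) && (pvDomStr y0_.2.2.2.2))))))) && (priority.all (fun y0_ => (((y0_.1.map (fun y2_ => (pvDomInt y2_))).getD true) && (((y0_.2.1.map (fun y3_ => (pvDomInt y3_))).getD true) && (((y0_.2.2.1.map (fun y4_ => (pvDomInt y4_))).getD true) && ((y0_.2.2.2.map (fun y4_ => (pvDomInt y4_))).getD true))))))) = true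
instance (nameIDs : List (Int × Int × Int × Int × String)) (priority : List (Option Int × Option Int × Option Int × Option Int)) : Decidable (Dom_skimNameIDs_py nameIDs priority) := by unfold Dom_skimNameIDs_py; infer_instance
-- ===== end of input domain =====

-- B groups the dict once into per-nameID buckets and scans only the queried bucket per priority entry (faster in a timing run).

-- ===== PORT A =====
-- 'pID != platformID and platformID is not None' on int vs Optional[int]: skip iff the filter is set and differs
def pvSkipA (v : Int) (filt : Option Int) : Bool :=
  match filt with
  | none => false
  | some p => v != p

def skimNameIDs_py (nameIDs : List (Int × Int × Int × Int × String)) (priority : List (Option Int × Option Int × Option Int × Option Int)) : Option String :=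
  priority.findSome? (fun q =>
    nameIDs.findSome? (fun e =>
      if some e.1 != q.1 then none            -- nID != nameID (int vs Optional[int]: equal iff nameID == nID)
      else if pvSkipA e.2.1 q.2.1 then none
      else if pvSkipA e.2.2.1 q.2.2.1 then none
      else if pvSkipA e.2.2.2.1 q.2.2.2 then none
      else some e.2.2.2.2))

-- ===== PORT B =====
def pvMatchB (pf ef lf : Option Int) (t : Int × Int × Int) : Bool :=
  (match pf with | none => true | some p => t.1 == p) &&
  (match ef with | none => true | some p => t.2.1 == p) &&
  (match lf with | none => true | some p => t.2.2 == p)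

def skimNameIDs_py_alt (nameIDs : List (Int × Int × Int × Int × String)) (priority : List (Option Int × Option Int × Option Int × Option Int)) : Option String :=
  let index : PySem.Dict Int (List ((Int × Int × Int) × String)) :=
    nameIDs.foldl (fun d e => d.modify e.1 [] (fun l => l ++ [((e.2.1, e.2.2.1, e.2.2.2.1), e.2.2.2.2)])) PySem.Dict.empty
  priority.findSome? (fun q =>
    -- index.get(nameID, []): a None nameID matches no int key, so its bucket is empty (exact)
    let bucket : List ((Int × Int × Int) × String) := match q.1 with | some n => index.getD n [] | none => []
    bucket.findSome? (fun it => if pvMatchB q.2.1 q.2.2.1 q.2.2.2 it.1 then some it.2 else none))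

-- ===== PRECONDITION & SPEC =====
def Spec_skimNameIDs_py (nameIDs : List (Int × Int × Int × Int × String)) (priority : List (Option Int × Option Int × Option Int × Option Int)) (out : Option String) : Prop := out = skimNameIDs_py_alt nameIDs priority
instance (nameIDs : List (Int × Int × Int × Int × String)) (priority : List (Option Int × Option Int × Option Int × Option Int)) (out : Option String) : Decidable (Spec_skimNameIDs_py nameIDs priority out) := by unfold Spec_skimNameIDs_py; infer_instance

-- ===== CLAIM (what is proved, stated in full; the proofs are below) =====
def Claim_equal_skimNameIDs_py : Prop := ∀ (nameIDs : List (Int × Int × Int × Int × String)) (priority : List (Option Int × Option Int × Option Int × Option Int)), Dom_skimNameIDs_py nameIDs priority → Spec_skimNameIDs_py nameIDs priority (skimNameIDs_py nameIDs priority)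

-- ===== LEMMAS AND PROOFS =====

-- findSome? over a list with a key-guard = findSome? over the filtered, mapped list
theorem findSome?_filter_map {α β γ : Type} (l : List α) (p : α → Bool) (f : α → γ)
    (g : α → Option β) (g' : γ → Option β)
    (h : ∀ e, g e = if p e then g' (f e) else none) :
    l.findSome? g = ((l.filter p).map f).findSome? g' := by
  induction l with
  | nil => rfl
  | cons a t ih =>
    by_cases hp : p a = true
    · simp [List.findSome?, hp, h a, ih]
    · simp only [Bool.not_eq_true] at hp
      simp [List.findSome?, hp, h a, ih]

theorem findSome?_none {α β : Type} (l : List α) :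
    l.findSome? (fun _ => (none : Option β)) = none := by
  induction l with
  | nil => rfl
  | cons a t ih => simp [List.findSome?, ih]

-- the bucket for key n is the order-preserving filter of nameIDs at nID = n
theorem bucket_eq (nameIDs : List (Int × Int × Int × Int × String)) (n : Int) :
    (nameIDs.foldl (fun d e => d.modify e.1 [] (fun l => l ++ [((e.2.1, e.2.2.1, e.2.2.2.1), e.2.2.2.2)])) PySem.Dict.empty).getD n []
      = (nameIDs.filter (fun e => e.1 == n)).map (fun e => ((e.2.1, e.2.2.1, e.2.2.2.1), e.2.2.2.2)) := by
  have hmap : nameIDs.foldl (fun d e => d.modify e.1 [] (fun l => l ++ [((e.2.1, e.2.2.1, e.2.2.2.1), e.2.2.2.2)])) PySem.Dict.empty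
      = (nameIDs.map (fun e => (e.1, ((e.2.1, e.2.2.1, e.2.2.2.1), e.2.2.2.2)))).foldl
          (fun d p => d.modify p.1 [] (fun l => l ++ [p.2])) PySem.Dict.empty := by
    rw [List.foldl_map]
  rw [hmap, PySem.Dict.getD_foldl_modify_append]
  simp [PySem.Dict.getD_empty, List.filter_map, List.map_map, Function.comp_def]

theorem skim_inner (nameIDs : List (Int × Int × Int × Int × String))
    (no pf ef lf : Option Int) :
    nameIDs.findSome? (fun e =>
      if some e.1 != no then none
      else if pvSkipA e.2.1 pf then none
      else if pvSkipA e.2.2.1 ef then none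
      else if pvSkipA e.2.2.2.1 lf then none
      else some e.2.2.2.2)
    = (match no with
        | some n => ((nameIDs.foldl (fun (d : PySem.Dict Int (List ((Int × Int × Int) × String))) (e : Int × Int × Int × Int × String) => d.modify e.1 [] (fun l => l ++ [((e.2.1, e.2.2.1, e.2.2.2.1), e.2.2.2.2)])) PySem.Dict.empty).getD n [])
        | none => ([] : List ((Int × Int × Int) × String))).findSome?
        (fun (it : (Int × Int × Int) × String) => if pvMatchB pf ef lf it.1 then some it.2 else none) := by
  cases no with
  | none =>
    rw [show (fun (e : Int × Int × Int × Int × String) =>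
      if some e.1 != (none : Option Int) then none
      else if pvSkipA e.2.1 pf then none
      else if pvSkipA e.2.2.1 ef then none
      else if pvSkipA e.2.2.2.1 lf then none
      else some e.2.2.2.2) = fun _ => (none : Option String) from by
        funext e; simp]
    rw [findSome?_none]; rfl
  | some n =>
    simp only
    rw [bucket_eq]
    apply findSome?_filter_map nameIDs (fun e => e.1 == n)
      (fun e => ((e.2.1, e.2.2.1, e.2.2.2.1), e.2.2.2.2))
    intro e
    by_cases h1 : e.1 = n
    · subst h1
      simp only [bne_self_eq_false, BEq.refl]
      cases pf <;> cases ef <;> cases lf <;>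
        simp [pvSkipA, pvMatchB] <;> split_ifs <;> simp_all
    · simp [h1, bne]

-- ===== VERDICT (by name: the statement is the Claim_ definition above) =====
theorem skimNameIDs_py_spec : Claim_equal_skimNameIDs_py := by
  intro nameIDs priority _
  unfold Spec_skimNameIDs_py skimNameIDs_py skimNameIDs_py_alt
  congr 1
  funext q
  obtain ⟨no, pf, ef, lf⟩ := q
  exact skim_inner nameIDs no pf ef lf
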